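-- pv_equiv track=rewrite | github.com/jcockbain/advent-of-code-2020 | python/src/day19/main.py | matches_rule8
-- ===== SOURCE A (Python) =====
-- def matches_rule8(prefixes, suffixes, message):
--     for p in prefixes:
--         if len(message) < len(p):
--             return False
--         if message.startswith(p):
--             if matches_rule11(prefixes, suffixes, message[len(p):]):
--                 return True
--             elif matches_rule8(prefixes, suffixes, message[len(p):]):
--                 return True
--     return False
--
-- def matches_rule11(prefixes, suffixes, message):
--     for p in prefixes:
--         for s in suffixes:
--             if len(message) < len(p) + len(s):
--                 return False
--             if message.startswith(p) and message.endswith(s):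
--                 if len(message) == len(p) + len(s):
--                     return True
--                 elif matches_rule11(prefixes, suffixes, message[len(p):len(message)-len(s)]):
--                     return True
--     return False
-- ===== SOURCE B (Python) =====
-- def matches_rule8(prefixes, suffixes, message):
--     # Bottom-up dynamic programming over substrings: r11[(i, j)] is the
--     # rule-11 answer for message[i:j], filled by increasing window length,
--     # then r8[i] (rule-8 answer for message[i:]) filled right to left.
--     n = len(message)
--     r11 = {}
--     for length in range(n + 1):
--         for i in range(n - length + 1):
--             j = i + length
--             r11[(i, j)] = _rule11_cell(prefixes, suffixes, message, i, j, r11)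
--     r8 = {}
--     for i in reversed(range(n + 1)):
--         r8[i] = _rule8_cell(prefixes, message, i, n, r11, r8)
--     return r8[0]
--
-- def _rule11_cell(prefixes, suffixes, message, i, j, r11):
--     for p in prefixes:
--         for s in suffixes:
--             if j - i < len(p) + len(s):
--                 return False
--             if message.startswith(p, i, j) and message.endswith(s, i, j):
--                 if j - i == len(p) + len(s):
--                     return True
--                 if r11.get((i + len(p), j - len(s)), False):
--                     return True
--     return False
--
-- def _rule8_cell(prefixes, message, i, n, r11, r8):
--     for p in prefixes:
--         if n - i < len(p):
--             return False
--         if message.startswith(p, i, n):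
--             if r11.get((i + len(p), n), False):
--                 return True
--             if r8.get(i + len(p), False):
--                 return True
--     return False
-- ===== Notes on version B (the rewrite author's own statement) =====
-- stated objective: alternative
-- what changed: A's exponential mutual recursion over rules 8/11 is replaced by bottom-up dynamic programming: a table r11[(i,j)] over substring windows filled by increasing length and a table r8[i] over message suffixes filled right to left, so each subproblem is evaluated once (it trades A's exponential worst case for an always-quadratic table fill, which is slower than A on large easy inputs).
-- outside the precondition, e.g. on matches_rule8(['', 'a'], ['b'], 'ab'): A returns True, B returns True
import Mathlib
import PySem

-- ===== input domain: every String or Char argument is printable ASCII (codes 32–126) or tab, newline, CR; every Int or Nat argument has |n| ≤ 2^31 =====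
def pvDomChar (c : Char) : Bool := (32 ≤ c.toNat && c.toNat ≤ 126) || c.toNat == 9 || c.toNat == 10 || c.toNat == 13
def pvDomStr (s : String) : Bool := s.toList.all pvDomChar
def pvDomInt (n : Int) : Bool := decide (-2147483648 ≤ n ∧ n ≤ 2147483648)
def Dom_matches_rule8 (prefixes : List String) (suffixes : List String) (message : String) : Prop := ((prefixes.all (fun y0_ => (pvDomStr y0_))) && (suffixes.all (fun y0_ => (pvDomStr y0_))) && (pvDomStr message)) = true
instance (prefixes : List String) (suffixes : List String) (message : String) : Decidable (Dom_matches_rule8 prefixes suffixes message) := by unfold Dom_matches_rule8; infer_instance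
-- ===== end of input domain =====

-- B replaces A's exponential mutual recursion by bottom-up dynamic programming over
-- substring windows, each subproblem evaluated once (objective: alternative); return
-- values proved equal on Pre_.

-- ===== PORT A =====
-- Each Python 'for' loop is a structural recursion over the remaining list;
-- 'some b' means the loop body executed 'return b', 'none' means it fell through.
-- inner 'for s in suffixes' of matches_rule11
def pvInner11 (rec : List Char → Bool) (m : List Char) (p : String) : List String → Option Bool
  | [] => none
  | s :: rest =>
    if m.length < p.toList.length + s.toList.length then some false
    else if PySem.Chars.startswith m p.toList && PySem.Chars.endswith m s.toList then
      if m.length = p.toList.length + s.toList.length then some true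
      -- message[len(p):len(message)-len(s)]  (0 ≤ len(p) ≤ len(message)-len(s) here, so Nat subtraction is exact)
      else if rec (PySem.List.slice m (some (p.toList.length : Int)) (some ((m.length - s.toList.length : Nat) : Int))) then some true
      else pvInner11 rec m p rest
    else pvInner11 rec m p rest

-- outer 'for p in prefixes' of matches_rule11
def pvLoop11 (rec : List Char → Bool) (m : List Char) (ss : List String) : List String → Bool
  | [] => false
  | p :: rest =>
    match pvInner11 rec m p ss with
    | some b => b
    | none => pvLoop11 rec m ss rest

-- matches_rule11; the fuel only makes the Python recursion structural (see matches_rule8 below)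
def pvRule11 (ps ss : List String) : Nat → List Char → Bool
  | 0, _ => false
  | f + 1, m => pvLoop11 (pvRule11 ps ss f) m ss ps

-- 'for p in prefixes' of matches_rule8
def pvLoop8 (rec11 rec8 : List Char → Bool) (m : List Char) : List String → Bool
  | [] => false
  | p :: rest =>
    if m.length < p.toList.length then false
    else if PySem.Chars.startswith m p.toList then
      if rec11 (PySem.List.slice m (some (p.toList.length : Int)) none) then true
      else if rec8 (PySem.List.slice m (some (p.toList.length : Int)) none) then true
      else pvLoop8 rec11 rec8 m rest
    else pvLoop8 rec11 rec8 m rest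

def pvRule8 (ps ss : List String) : Nat → List Char → Bool
  | 0, _ => false
  | f + 1, m => pvLoop8 (pvRule11 ps ss f) (pvRule8 ps ss f) m ps

-- Fuel 2*(len+1) bounds the depth of every terminating run of the Python recursion
-- (each call either shortens the message or is the single rule8→rule11 step on the same
-- message); it only makes the recursion structural — under Pre_ the value is
-- fuel-independent (pvRule8_stable below).
def matches_rule8 (prefixes : List String) (suffixes : List String) (message : String) : Bool :=
  pvRule8 prefixes suffixes (2 * (message.toList.length + 1)) message.toList

-- ===== PORT B =====
-- Source B: r11[(i,j)] filled bottom-up by window length, then r8[i] right to left;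
-- the dicts (read with .get(·, False)) are modeled as functions updated pointwise.
def pvCellInner (t : Nat → Nat → Bool) (msg : List Char) (i j : Nat) (p : String) : List String → Option Bool
  | [] => none
  | s :: rest =>
    if j - i < p.toList.length + s.toList.length then some false
    -- message.startswith(p, i, j) / endswith(s, i, j) test on the window message[i:j]
    else if PySem.Chars.startswith (PySem.List.slice msg (some (i : Int)) (some (j : Int))) p.toList &&
            PySem.Chars.endswith (PySem.List.slice msg (some (i : Int)) (some (j : Int))) s.toList then
      if j - i = p.toList.length + s.toList.length then some true
      else if t (i + p.toList.length) (j - s.toList.length) then some true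
      else pvCellInner t msg i j p rest
    else pvCellInner t msg i j p rest

def pvCell11 (t : Nat → Nat → Bool) (msg : List Char) (i j : Nat) (ss : List String) : List String → Bool
  | [] => false
  | p :: rest =>
    match pvCellInner t msg i j p ss with
    | some b => b
    | none => pvCell11 t msg i j ss rest

def pvCell8 (t : Nat → Nat → Bool) (r : Nat → Bool) (msg : List Char) (i n : Nat) : List String → Bool
  | [] => false
  | p :: rest =>
    if n - i < p.toList.length then false
    else if PySem.Chars.startswith (PySem.List.slice msg (some (i : Int)) none) p.toList then
      if t (i + p.toList.length) n then true
      else if r (i + p.toList.length) then true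
      else pvCell8 t r msg i n rest
    else pvCell8 t r msg i n rest

-- dict assignment r11[(i,j)] = v
def pvUpd11 (t : Nat → Nat → Bool) (i j : Nat) (v : Bool) : Nat → Nat → Bool :=
  fun i' j' => if i' = i ∧ j' = j then v else t i' j'

-- dict assignment r8[i] = v
def pvUpd8 (r : Nat → Bool) (i : Nat) (v : Bool) : Nat → Bool :=
  fun i' => if i' = i then v else r i'

-- 'for i in range(n - length + 1)'
def pvRow11 (ps ss : List String) (msg : List Char) (len : Nat) (t : Nat → Nat → Bool) : Nat → Nat → Bool :=
  (List.range (msg.length - len + 1)).foldl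
    (fun t i => pvUpd11 t i (i + len) (pvCell11 t msg i (i + len) ss ps)) t

-- 'for length in range(n + 1)'
def pvFill11 (ps ss : List String) (msg : List Char) : Nat → Nat → Bool :=
  (List.range (msg.length + 1)).foldl (fun t len => pvRow11 ps ss msg len t) (fun _ _ => false)

-- 'for i in reversed(range(n + 1))'
def pvFill8 (ps : List String) (msg : List Char) (t : Nat → Nat → Bool) : Nat → Bool :=
  ((List.range (msg.length + 1)).reverse).foldl
    (fun r i => pvUpd8 r i (pvCell8 t r msg i msg.length ps)) (fun _ => false)

def matches_rule8_alt (prefixes : List String) (suffixes : List String) (message : String) : Bool :=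
  pvFill8 prefixes message.toList (pvFill11 prefixes suffixes message.toList) 0

-- ===== PRECONDITION & SPEC =====
-- pvGuardB n l: scanning l left to right, a string longer than n occurs before any
-- empty string (A's loops return False at such a "wall" prefix and never scan past it).
def pvGuardB (n : Nat) : List String → Bool
  | [] => true
  | p :: rest => decide (n < p.toList.length) || (decide (p.toList ≠ []) && pvGuardB n rest)

-- Pre_ excludes inputs on which A's scans can reach an empty prefix (no longer-than-message
-- prefix before it): there Python A either recurses forever on an unshortened message
-- (RecursionError) or returns only by an accident of how earlier matches settle; B always returns.
def Pre_matches_rule8 (prefixes : List String) (suffixes : List String) (message : String) : Prop :=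
  pvGuardB message.toList.length prefixes = true
instance (prefixes : List String) (suffixes : List String) (message : String) : Decidable (Pre_matches_rule8 prefixes suffixes message) := by unfold Pre_matches_rule8; infer_instance

def pvWitness_matches_rule8 : List String × List String × String := (["ab"], ["b"], "abb")

def Spec_matches_rule8 (prefixes : List String) (suffixes : List String) (message : String) (out : Bool) : Prop := out = matches_rule8_alt prefixes suffixes message
instance (prefixes : List String) (suffixes : List String) (message : String) (out : Bool) : Decidable (Spec_matches_rule8 prefixes suffixes message out) := by unfold Spec_matches_rule8; infer_instance

-- ===== CLAIM (what is proved, stated in full; the proofs are below) =====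
def Claim_equal_matches_rule8 : Prop := ∀ (prefixes : List String) (suffixes : List String) (message : String), Dom_matches_rule8 prefixes suffixes message → Pre_matches_rule8 prefixes suffixes message → Spec_matches_rule8 prefixes suffixes message (matches_rule8 prefixes suffixes message)

-- ===== LEMMAS AND PROOFS =====

-- A's two functions applied with just enough fuel (their behaviour under Pre_)
def pvR11 (ps ss : List String) (m : List Char) : Bool := pvRule11 ps ss (m.length + 1) m
def pvR8 (ps ss : List String) (m : List Char) : Bool := pvRule8 ps ss (m.length + 1) m

-- the window message[i:j]
def pvSub (msg : List Char) (i j : Nat) : List Char := (msg.drop i).take (j - i)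

theorem pvSub_length (msg : List Char) (i j : Nat) (hij : i ≤ j) (hj : j ≤ msg.length) :
    (pvSub msg i j).length = j - i := by
  simp [pvSub]; omega

theorem pvSub_full (msg : List Char) (k : Nat) (hk : k ≤ msg.length) :
    pvSub msg k msg.length = msg.drop k := by
  unfold pvSub
  apply List.take_of_length_le
  simp

theorem pvSub_sub (msg : List Char) (i j lp ls : Nat) (hij : i ≤ j) (hj : j ≤ msg.length)
    (hw : lp + ls ≤ j - i) :
    ((pvSub msg i j).drop lp).take ((j - i - ls) - lp) = pvSub msg (i + lp) (j - ls) := by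
  unfold pvSub
  rw [List.drop_take, List.drop_drop, List.take_take]
  congr 1
  omega

theorem pvGuardB_mono (l : List String) : ∀ {m n : Nat}, m ≤ n →
    pvGuardB n l = true → pvGuardB m l = true := by
  induction l with
  | nil => intro m n _ _; rfl
  | cons p rest ih =>
    intro m n hmn hg
    simp only [pvGuardB, Bool.or_eq_true, Bool.and_eq_true, decide_eq_true_eq] at hg ⊢
    rcases hg with hw | ⟨hp, hrest⟩
    · exact Or.inl (by omega)
    · exact Or.inr ⟨hp, ih hmn hrest⟩

theorem pvLoop11_ss_nil (rec : List Char → Bool) (m : List Char) (l : List String) :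
    pvLoop11 rec m [] l = false := by
  induction l with
  | nil => rfl
  | cons p rest ih => simpa [pvLoop11, pvInner11] using ih

theorem pvCell11_ss_nil (t : Nat → Nat → Bool) (msg : List Char) (i j : Nat) (l : List String) :
    pvCell11 t msg i j [] l = false := by
  induction l with
  | nil => rfl
  | cons p rest ih => simpa [pvCell11, pvCellInner] using ih

theorem pvInner11_congr (rec rec' : List Char → Bool) (m : List Char) (p : String)
    (hp : p.toList ≠ []) (h : ∀ x : List Char, x.length < m.length → rec x = rec' x)
    (l : List String) : pvInner11 rec m p l = pvInner11 rec' m p l := by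
  have hlp : 0 < p.toList.length := List.length_pos_of_ne_nil hp
  induction l with
  | nil => rfl
  | cons s rest ih =>
    simp only [pvInner11]
    by_cases h1 : m.length < p.toList.length + s.toList.length
    · simp only [if_pos h1]
    · simp only [if_neg h1]
      by_cases h2 : (PySem.Chars.startswith m p.toList && PySem.Chars.endswith m s.toList) = true
      · simp only [if_pos h2]
        by_cases h3 : m.length = p.toList.length + s.toList.length
        · simp only [if_pos h3]
        · have harg : rec (PySem.List.slice m (some (p.toList.length : Int))
              (some ((m.length - s.toList.length : Nat) : Int))) =
              rec' (PySem.List.slice m (some (p.toList.length : Int))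
              (some ((m.length - s.toList.length : Nat) : Int))) := by
            apply h
            rw [PySem.List.slice_natCast]
            simp only [List.length_take, List.length_drop]
            omega
          simp only [if_neg h3, harg, ih]
      · simp only [if_neg h2, ih]

theorem pvLoop11_congr (rec rec' : List Char → Bool) (m : List Char) (ss : List String)
    (l : List String) (hg : pvGuardB m.length l = true)
    (h : ∀ x : List Char, x.length < m.length → rec x = rec' x) :
    pvLoop11 rec m ss l = pvLoop11 rec' m ss l := by
  cases ss with
  | nil => rw [pvLoop11_ss_nil, pvLoop11_ss_nil]
  | cons s0 ss' =>
    induction l with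
    | nil => rfl
    | cons p rest ih =>
      simp only [pvGuardB, Bool.or_eq_true, Bool.and_eq_true, decide_eq_true_eq] at hg
      rcases hg with hw | ⟨hp, hrest⟩
      · simp only [pvLoop11, pvInner11,
          if_pos (show m.length < p.toList.length + s0.toList.length by omega)]
      · simp only [pvLoop11, pvInner11_congr rec rec' m p hp h (s0 :: ss')]
        cases hv : pvInner11 rec' m p (s0 :: ss') with
        | some b => rfl
        | none => exact ih hrest

theorem pvLoop8_congr (rec11 rec11' rec8 rec8' : List Char → Bool) (m : List Char)
    (l : List String) (hg : pvGuardB m.length l = true)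
    (h11 : ∀ x : List Char, x.length < m.length → rec11 x = rec11' x)
    (h8 : ∀ x : List Char, x.length < m.length → rec8 x = rec8' x) :
    pvLoop8 rec11 rec8 m l = pvLoop8 rec11' rec8' m l := by
  induction l with
  | nil => rfl
  | cons p rest ih =>
    simp only [pvGuardB, Bool.or_eq_true, Bool.and_eq_true, decide_eq_true_eq] at hg
    rcases hg with hw | ⟨hp, hrest⟩
    · simp only [pvLoop8, if_pos hw]
    · have hlp : 0 < p.toList.length := List.length_pos_of_ne_nil hp
      have ih' := ih hrest
      simp only [pvLoop8]
      by_cases h1 : m.length < p.toList.length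
      · simp only [if_pos h1]
      · simp only [if_neg h1]
        by_cases h2 : PySem.Chars.startswith m p.toList = true
        · have hlt : (PySem.List.slice m (some (p.toList.length : Int)) none).length < m.length := by
            rw [PySem.List.slice_from_natCast]
            simp only [List.length_drop]
            omega
          simp only [if_pos h2, h11 _ hlt, h8 _ hlt, ih']
        · simp only [if_neg h2, ih']

theorem pvRule11_stable (ps ss : List String) :
    ∀ (k : Nat) (m : List Char) (f₁ f₂ : Nat), pvGuardB m.length ps = true →
      m.length ≤ k → m.length < f₁ → m.length < f₂ →
      pvRule11 ps ss f₁ m = pvRule11 ps ss f₂ m := by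
  intro k
  induction k with
  | zero =>
    intro m f₁ f₂ hg hk h1 h2
    obtain ⟨a, rfl⟩ : ∃ a, f₁ = a + 1 := ⟨f₁ - 1, by omega⟩
    obtain ⟨b, rfl⟩ : ∃ b, f₂ = b + 1 := ⟨f₂ - 1, by omega⟩
    simp only [pvRule11]
    exact pvLoop11_congr _ _ m ss ps hg (fun x hx => absurd hx (by omega))
  | succ k ih =>
    intro m f₁ f₂ hg hk h1 h2
    obtain ⟨a, rfl⟩ : ∃ a, f₁ = a + 1 := ⟨f₁ - 1, by omega⟩
    obtain ⟨b, rfl⟩ : ∃ b, f₂ = b + 1 := ⟨f₂ - 1, by omega⟩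
    simp only [pvRule11]
    exact pvLoop11_congr _ _ m ss ps hg
      (fun x hx => ih x a b (pvGuardB_mono ps (by omega) hg) (by omega) (by omega) (by omega))

theorem pvRule8_stable (ps ss : List String) :
    ∀ (k : Nat) (m : List Char) (f₁ f₂ : Nat), pvGuardB m.length ps = true →
      m.length ≤ k → m.length < f₁ → m.length < f₂ →
      pvRule8 ps ss f₁ m = pvRule8 ps ss f₂ m := by
  intro k
  induction k with
  | zero =>
    intro m f₁ f₂ hg hk h1 h2
    obtain ⟨a, rfl⟩ : ∃ a, f₁ = a + 1 := ⟨f₁ - 1, by omega⟩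
    obtain ⟨b, rfl⟩ : ∃ b, f₂ = b + 1 := ⟨f₂ - 1, by omega⟩
    simp only [pvRule8]
    exact pvLoop8_congr _ _ _ _ m ps hg (fun x hx => absurd hx (by omega))
      (fun x hx => absurd hx (by omega))
  | succ k ih =>
    intro m f₁ f₂ hg hk h1 h2
    obtain ⟨a, rfl⟩ : ∃ a, f₁ = a + 1 := ⟨f₁ - 1, by omega⟩
    obtain ⟨b, rfl⟩ : ∃ b, f₂ = b + 1 := ⟨f₂ - 1, by omega⟩
    simp only [pvRule8]
    exact pvLoop8_congr _ _ _ _ m ps hg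
      (fun x hx => pvRule11_stable ps ss x.length x a b
        (pvGuardB_mono ps (by omega) hg) le_rfl (by omega) (by omega))
      (fun x hx => ih x a b (pvGuardB_mono ps (by omega) hg) (by omega) (by omega) (by omega))

theorem pvR11_eq (ps ss : List String) (m : List Char) (hg : pvGuardB m.length ps = true) :
    pvR11 ps ss m = pvLoop11 (pvR11 ps ss) m ss ps := by
  have h0 : pvR11 ps ss m = pvLoop11 (pvRule11 ps ss m.length) m ss ps := rfl
  rw [h0]
  apply pvLoop11_congr _ _ m ss ps hg
  intro x hx
  show pvRule11 ps ss m.length x = pvRule11 ps ss (x.length + 1) x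
  exact pvRule11_stable ps ss x.length x m.length (x.length + 1)
    (pvGuardB_mono ps (by omega) hg) le_rfl hx (by omega)

theorem pvR8_eq (ps ss : List String) (m : List Char) (hg : pvGuardB m.length ps = true) :
    pvR8 ps ss m = pvLoop8 (pvR11 ps ss) (pvR8 ps ss) m ps := by
  have h0 : pvR8 ps ss m = pvLoop8 (pvRule11 ps ss m.length) (pvRule8 ps ss m.length) m ps := rfl
  rw [h0]
  apply pvLoop8_congr _ _ _ _ m ps hg
  · intro x hx
    show pvRule11 ps ss m.length x = pvRule11 ps ss (x.length + 1) x
    exact pvRule11_stable ps ss x.length x m.length (x.length + 1)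
      (pvGuardB_mono ps (by omega) hg) le_rfl hx (by omega)
  · intro x hx
    show pvRule8 ps ss m.length x = pvRule8 ps ss (x.length + 1) x
    exact pvRule8_stable ps ss x.length x m.length (x.length + 1)
      (pvGuardB_mono ps (by omega) hg) le_rfl hx (by omega)

theorem pvCellInner_eq (ps ss : List String) (t : Nat → Nat → Bool) (msg : List Char)
    (i j : Nat) (p : String) (hp : p.toList ≠ []) (hij : i ≤ j) (hj : j ≤ msg.length)
    (hread : ∀ i' j', i ≤ i' → i' ≤ j' → j' ≤ j → j' - i' < j - i →
      t i' j' = pvR11 ps ss (pvSub msg i' j'))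
    (l : List String) :
    pvCellInner t msg i j p l = pvInner11 (pvR11 ps ss) (pvSub msg i j) p l := by
  have hlp : 0 < p.toList.length := List.length_pos_of_ne_nil hp
  have hlen : (pvSub msg i j).length = j - i := pvSub_length msg i j hij hj
  have hsl : PySem.List.slice msg (some (i : Int)) (some (j : Int)) = pvSub msg i j := by
    rw [PySem.List.slice_natCast]; rfl
  induction l with
  | nil => rfl
  | cons s rest ih =>
    simp only [pvCellInner, pvInner11, hsl, hlen]
    by_cases h1 : j - i < p.toList.length + s.toList.length
    · simp only [if_pos h1]
    · simp only [if_neg h1]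
      by_cases h2 : (PySem.Chars.startswith (pvSub msg i j) p.toList &&
          PySem.Chars.endswith (pvSub msg i j) s.toList) = true
      · simp only [if_pos h2]
        by_cases h3 : j - i = p.toList.length + s.toList.length
        · simp only [if_pos h3]
        · have hargeq : PySem.List.slice (pvSub msg i j) (some (p.toList.length : Int))
              (some ((j - i - s.toList.length : Nat) : Int)) =
              pvSub msg (i + p.toList.length) (j - s.toList.length) := by
            rw [PySem.List.slice_natCast]
            exact pvSub_sub msg i j _ _ hij hj (by omega)
          have ht' : t (i + p.toList.length) (j - s.toList.length) =
              pvR11 ps ss (pvSub msg (i + p.toList.length) (j - s.toList.length)) :=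
            hread _ _ (by omega) (by omega) (by omega) (by omega)
          simp only [if_neg h3, hargeq, ht', ih]
      · simp only [if_neg h2, ih]

theorem pvCell11_eq (ps ss : List String) (t : Nat → Nat → Bool) (msg : List Char)
    (i j : Nat) (hij : i ≤ j) (hj : j ≤ msg.length) (hg : pvGuardB msg.length ps = true)
    (hread : ∀ i' j', i ≤ i' → i' ≤ j' → j' ≤ j → j' - i' < j - i →
      t i' j' = pvR11 ps ss (pvSub msg i' j')) :
    pvCell11 t msg i j ss ps = pvR11 ps ss (pvSub msg i j) := by
  have hgm : pvGuardB (pvSub msg i j).length ps = true := by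
    rw [pvSub_length msg i j hij hj]
    exact pvGuardB_mono ps (by omega) hg
  rw [pvR11_eq ps ss (pvSub msg i j) hgm]
  cases ss with
  | nil =>
    rw [pvCell11_ss_nil, pvLoop11_ss_nil]
  | cons s0 ss' =>
    have main : ∀ l : List String, pvGuardB msg.length l = true →
        pvCell11 t msg i j (s0 :: ss') l = pvLoop11 (pvR11 ps (s0 :: ss')) (pvSub msg i j) (s0 :: ss') l := by
      intro l
      induction l with
      | nil => intro _; rfl
      | cons p rest ih =>
        intro hgl
        simp only [pvGuardB, Bool.or_eq_true, Bool.and_eq_true, decide_eq_true_eq] at hgl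
        rcases hgl with hw | ⟨hp, hrest⟩
        · simp only [pvCell11, pvLoop11, pvCellInner, pvInner11,
            pvSub_length msg i j hij hj,
            if_pos (show j - i < p.toList.length + s0.toList.length by omega)]
        · simp only [pvCell11, pvLoop11,
            pvCellInner_eq ps (s0 :: ss') t msg i j p hp hij hj hread (s0 :: ss')]
          cases hv : pvInner11 (pvR11 ps (s0 :: ss')) (pvSub msg i j) p (s0 :: ss') with
          | some b => rfl
          | none => exact ih hrest
    exact main ps hg

theorem pvRow11_inv (ps ss : List String) (msg : List Char) (L : Nat)
    (hg : pvGuardB msg.length ps = true) (hL : L ≤ msg.length) (t : Nat → Nat → Bool)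
    (ht : ∀ i j, t i j = if i ≤ j ∧ j ≤ msg.length ∧ j - i < L then pvR11 ps ss (pvSub msg i j) else false) :
    ∀ I, I ≤ msg.length - L + 1 →
      ∀ i j, ((List.range I).foldl
          (fun t i => pvUpd11 t i (i + L) (pvCell11 t msg i (i + L) ss ps)) t) i j =
        if (i ≤ j ∧ j ≤ msg.length ∧ j - i < L) ∨ (j = i + L ∧ j ≤ msg.length ∧ i < I)
        then pvR11 ps ss (pvSub msg i j) else false := by
  intro I
  induction I with
  | zero =>
    intro _ i j
    simp only [List.range_zero, List.foldl_nil]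
    rw [ht i j]
    split_ifs <;> first | rfl | omega
  | succ I ihI =>
    intro hI i j
    rw [List.range_succ, List.foldl_append, List.foldl_cons, List.foldl_nil]
    have hT := ihI (by omega)
    have hcell : pvCell11 ((List.range I).foldl
        (fun t i => pvUpd11 t i (i + L) (pvCell11 t msg i (i + L) ss ps)) t) msg I (I + L) ss ps =
        pvR11 ps ss (pvSub msg I (I + L)) := by
      apply pvCell11_eq ps ss _ msg I (I + L) (by omega) (by omega) hg
      intro i' j' h1 h2 h3 h4
      rw [hT i' j', if_pos (Or.inl ⟨h2, by omega, by omega⟩)]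
    simp only [pvUpd11]
    by_cases hcase : i = I ∧ j = I + L
    · obtain ⟨rfl, rfl⟩ := hcase
      rw [if_pos ⟨rfl, rfl⟩, hcell, if_pos (Or.inr ⟨rfl, by omega, by omega⟩)]
    · rw [if_neg hcase, hT i j]
      split_ifs <;> first | rfl | omega

theorem pvFill11_eq (ps ss : List String) (msg : List Char) (hg : pvGuardB msg.length ps = true) :
    ∀ i j, pvFill11 ps ss msg i j =
      if i ≤ j ∧ j ≤ msg.length then pvR11 ps ss (pvSub msg i j) else false := by
  have aux : ∀ L, L ≤ msg.length + 1 → ∀ i j,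
      ((List.range L).foldl (fun t len => pvRow11 ps ss msg len t) (fun _ _ => false)) i j =
      if i ≤ j ∧ j ≤ msg.length ∧ j - i < L then pvR11 ps ss (pvSub msg i j) else false := by
    intro L
    induction L with
    | zero =>
      intro _ i j
      simp only [List.range_zero, List.foldl_nil]
      split_ifs <;> first | rfl | omega
    | succ L ihL =>
      intro hL i j
      rw [List.range_succ, List.foldl_append, List.foldl_cons, List.foldl_nil]
      have hrow : pvRow11 ps ss msg L
          ((List.range L).foldl (fun t len => pvRow11 ps ss msg len t) (fun _ _ => false)) i j =
          if (i ≤ j ∧ j ≤ msg.length ∧ j - i < L) ∨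
              (j = i + L ∧ j ≤ msg.length ∧ i < msg.length - L + 1)
          then pvR11 ps ss (pvSub msg i j) else false :=
        pvRow11_inv ps ss msg L hg (by omega) _ (ihL (by omega)) (msg.length - L + 1) le_rfl i j
      rw [hrow]
      split_ifs <;> first | rfl | omega
  intro i j
  unfold pvFill11
  rw [aux (msg.length + 1) le_rfl i j]
  split_ifs <;> first | rfl | omega

theorem pvCell8_eq (ps ss : List String) (t : Nat → Nat → Bool) (r : Nat → Bool)
    (msg : List Char) (i : Nat) (hi : i ≤ msg.length)
    (ht : ∀ i' j', t i' j' = if i' ≤ j' ∧ j' ≤ msg.length then pvR11 ps ss (pvSub msg i' j') else false)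
    (hr : ∀ k, i < k → k ≤ msg.length → r k = pvR8 ps ss (msg.drop k))
    (l : List String) (hgl : pvGuardB msg.length l = true) :
    pvCell8 t r msg i msg.length l = pvLoop8 (pvR11 ps ss) (pvR8 ps ss) (msg.drop i) l := by
  have hsl : PySem.List.slice msg (some (i : Int)) none = msg.drop i :=
    PySem.List.slice_from_natCast msg i
  induction l with
  | nil => rfl
  | cons p rest ih =>
    simp only [pvGuardB, Bool.or_eq_true, Bool.and_eq_true, decide_eq_true_eq] at hgl
    rcases hgl with hw | ⟨hp, hrest⟩
    · simp only [pvCell8, pvLoop8, hsl, List.length_drop,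
        if_pos (show msg.length - i < p.toList.length by omega)]
    · have hlp : 0 < p.toList.length := List.length_pos_of_ne_nil hp
      have ih' := ih hrest
      simp only [pvCell8, pvLoop8, hsl, List.length_drop]
      by_cases h1 : msg.length - i < p.toList.length
      · simp only [if_pos h1]
      · simp only [if_neg h1]
        by_cases h2 : PySem.Chars.startswith (msg.drop i) p.toList = true
        · have hdd : PySem.List.slice (msg.drop i) (some (p.toList.length : Int)) none =
              msg.drop (i + p.toList.length) := by
            rw [PySem.List.slice_from_natCast, List.drop_drop]
          have ht' : t (i + p.toList.length) msg.length =
              pvR11 ps ss (msg.drop (i + p.toList.length)) := by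
            rw [ht, if_pos ⟨by omega, le_rfl⟩, pvSub_full msg _ (by omega)]
          have hr' : r (i + p.toList.length) = pvR8 ps ss (msg.drop (i + p.toList.length)) :=
            hr _ (by omega) (by omega)
          simp only [if_pos h2, hdd, ht', hr', ih']
        · simp only [if_neg h2, ih']

theorem pvFill8_inv (ps ss : List String) (msg : List Char) (t : Nat → Nat → Bool)
    (hg : pvGuardB msg.length ps = true)
    (ht : ∀ i' j', t i' j' = if i' ≤ j' ∧ j' ≤ msg.length then pvR11 ps ss (pvSub msg i' j') else false) :
    ∀ L, L ≤ msg.length + 1 → ∀ b : Nat → Bool,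
      (∀ k, L ≤ k → k ≤ msg.length → b k = pvR8 ps ss (msg.drop k)) →
      ∀ k, k ≤ msg.length →
        ((List.range L).foldr (fun i r => pvUpd8 r i (pvCell8 t r msg i msg.length ps)) b) k =
          pvR8 ps ss (msg.drop k) := by
  intro L
  induction L with
  | zero =>
    intro _ b hb k hk
    simp only [List.range_zero, List.foldr_nil]
    exact hb k (by omega) hk
  | succ L ihL =>
    intro hL b hb k hk
    rw [List.range_succ, List.foldr_append]
    simp only [List.foldr_cons, List.foldr_nil]
    refine ihL (by omega) _ ?_ k hk
    intro k' h1 h2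
    simp only [pvUpd8]
    by_cases hk' : k' = L
    · subst hk'
      rw [if_pos rfl]
      rw [pvCell8_eq ps ss t b msg k' (by omega) ht
        (fun k'' hgt hle => hb k'' (by omega) hle) ps hg]
      have hgm : pvGuardB (msg.drop k').length ps = true :=
        pvGuardB_mono ps (by simp) hg
      exact (pvR8_eq ps ss (msg.drop k') hgm).symm
    · rw [if_neg hk']
      exact hb k' (by omega) h2

-- ===== VERDICT (by name: the statement is the Claim_ definition above) =====
theorem matches_rule8_spec : Claim_equal_matches_rule8 := by
  intro ps ss msg hdom hpre
  unfold Spec_matches_rule8 matches_rule8 matches_rule8_alt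
  have hg : pvGuardB msg.toList.length ps = true := hpre
  have hA : pvRule8 ps ss (2 * (msg.toList.length + 1)) msg.toList = pvR8 ps ss msg.toList :=
    pvRule8_stable ps ss msg.toList.length msg.toList (2 * (msg.toList.length + 1))
      (msg.toList.length + 1) hg le_rfl (by omega) (by omega)
  rw [hA]
  unfold pvFill8
  rw [List.foldl_reverse]
  have hfin := pvFill8_inv ps ss msg.toList (pvFill11 ps ss msg.toList) hg
    (pvFill11_eq ps ss msg.toList hg) (msg.toList.length + 1) le_rfl (fun _ => false)
    (fun k h1 h2 => absurd h1 (by omega)) 0 (Nat.zero_le _)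
  rw [List.drop_zero] at hfin
  exact hfin.symm
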